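-- pv_equiv track=rewrite | github.com/buiducanh/CompetitiveProgramming | hackercup/round1/laundromat.py | laundry
-- ===== SOURCE A (Python) =====
-- def laundry(l, n, m, d, nums):
--     import queue
--     w = queue.PriorityQueue()
--     dry = [0 for i in range(m)]
--     dryIndex = 0
--     for i in range(len(nums)):
--         w.put((nums[i], i))
--     while l > 0:
--         l -= 1
--         timeFinishW, washIndex = w.get()
--         w.put((timeFinishW + nums[washIndex], washIndex))
--         timeDrierReady = max(dry[dryIndex], timeFinishW)
--         dry[dryIndex] = timeDrierReady + d
--         dryIndex = (dryIndex + 1) % m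
--     return dry[(dryIndex + m - 1) % m]
-- ===== SOURCE B (Python) =====
-- def laundry(l, n, m, d, nums):
--     if l <= 0:
--         return 0
--     next_free = list(nums)
--     times = []
--     for _ in range(l):
--         best_i = 0
--         for i in range(1, len(nums)):
--             if next_free[i] < next_free[best_i]:
--                 best_i = i
--         times.append(next_free[best_i])
--         next_free[best_i] += nums[best_i]
--     best = 0
--     for j in range((l - 1) % m, l, m):
--         best = max(best, times[j]) + d
--     return best
-- ===== Notes on version B (the rewrite author's own statement) =====
-- stated objective: alternative
-- what changed: B replaces A's priority-queue simulation by a plain next-finish-time array with a linear argmin scan per load, and replaces A's m-slot drier array with rotating index by a closed stride recurrence over every m-th wash time (only loads hitting the last-used drier matter).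
import Mathlib
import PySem

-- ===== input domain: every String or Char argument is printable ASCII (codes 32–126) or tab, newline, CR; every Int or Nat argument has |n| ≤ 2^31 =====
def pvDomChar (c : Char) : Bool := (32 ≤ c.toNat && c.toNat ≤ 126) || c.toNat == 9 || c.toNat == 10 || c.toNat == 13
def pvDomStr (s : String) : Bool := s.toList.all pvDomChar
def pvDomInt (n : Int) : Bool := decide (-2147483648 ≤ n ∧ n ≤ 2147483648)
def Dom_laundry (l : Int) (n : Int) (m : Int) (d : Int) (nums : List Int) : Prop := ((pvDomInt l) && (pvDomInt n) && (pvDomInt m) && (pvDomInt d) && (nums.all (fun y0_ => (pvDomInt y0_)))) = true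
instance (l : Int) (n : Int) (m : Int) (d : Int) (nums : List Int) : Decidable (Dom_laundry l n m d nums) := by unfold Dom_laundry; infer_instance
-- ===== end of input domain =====

-- B drops the priority queue (argmin scan over a next-finish array) and the drier array
-- (stride recurrence over every m-th wash time); objective: alternative structure, same values.

-- ===== PORT A =====
-- A's queue.PriorityQueue is modelled behaviourally: a list of (time, index) pairs,
-- put appends, get removes the lexicographically least pair (all pairs have distinct indices).
def pvLexLe (a b : Int × Int) : Bool := decide (a.1 < b.1 ∨ (a.1 = b.1 ∧ a.2 ≤ b.2))

def pvQMin : List (Int × Int) → Int × Int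
  | [] => (0, 0)
  | x :: xs => xs.foldl (fun a b => if pvLexLe a b then a else b) x

-- the 'while l > 0' loop of A; fuel = the current value of l
-- (all list indices are in range on inputs satisfying Pre_, where pyGetD/pySetD are exact)
def pvAStep (nums : List Int) (d m : Int) : Nat → List (Int × Int) → List Int → Int → List Int × Int
  | 0, _, dry, dryIndex => (dry, dryIndex)
  | fuel + 1, w, dry, dryIndex =>
      let p := pvQMin w
      let w' := w.erase p ++ [(p.1 + PySem.List.pyGetD nums p.2 0, p.2)]
      let timeDrierReady := max (PySem.List.pyGetD dry dryIndex 0) p.1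
      pvAStep nums d m fuel w' (PySem.List.pySetD dry dryIndex (timeDrierReady + d))
        (PySem.Int.mod (dryIndex + 1) m)

def laundry (l : Int) (n : Int) (m : Int) (d : Int) (nums : List Int) : Int :=
  let w0 := (PySem.List.pyRange 0 (nums.length : Int) 1).map
    (fun i => (PySem.List.pyGetD nums i 0, i))
  let s := pvAStep nums d m l.toNat w0 (List.replicate m.toNat 0) 0
  PySem.List.pyGetD s.1 (PySem.Int.mod (s.2 + m - 1) m) 0

-- ===== PORT B =====
-- 'best_i = 0; for i in range(1, len(nums)): if next_free[i] < next_free[best_i]: best_i = i'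
def pvArgmin (next : List Int) : Int :=
  (PySem.List.pyRange 1 (next.length : Int) 1).foldl
    (fun bi i => if PySem.List.pyGetD next i 0 < PySem.List.pyGetD next bi 0 then i else bi) 0

-- the 'for _ in range(l)' wash loop of B; times is the accumulator list
def pvBWash (nums : List Int) : Nat → List Int → List Int → List Int
  | 0, _, times => times
  | fuel + 1, next, times =>
      let bi := pvArgmin next
      let t := PySem.List.pyGetD next bi 0
      pvBWash nums fuel (PySem.List.pySetD next bi (t + PySem.List.pyGetD nums bi 0)) (times ++ [t])

def laundry_alt (l : Int) (n : Int) (m : Int) (d : Int) (nums : List Int) : Int :=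
  if l ≤ 0 then 0
  else
    let times := pvBWash nums l.toNat nums []
    (PySem.List.pyRange (PySem.Int.mod (l - 1) m) l m).foldl
      (fun best j => max best (PySem.List.pyGetD times j 0) + d) 0

-- ===== PRECONDITION & SPEC =====
-- Pre_ excludes exactly the inputs on which A does not return: m ≤ 0 (IndexError or
-- ZeroDivisionError on the drier array) and l > 0 with nums = [] (Queue.get() blocks forever).
def Pre_laundry (l : Int) (n : Int) (m : Int) (d : Int) (nums : List Int) : Prop :=
  1 ≤ m ∧ (0 < l → nums ≠ [])
instance (l : Int) (n : Int) (m : Int) (d : Int) (nums : List Int) : Decidable (Pre_laundry l n m d nums) := by unfold Pre_laundry; infer_instance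

def pvWitness_laundry : Int × Int × Int × Int × List Int := (3, 2, 2, 1, [1, 2])

def Spec_laundry (l : Int) (n : Int) (m : Int) (d : Int) (nums : List Int) (out : Int) : Prop := out = laundry_alt l n m d nums
instance (l : Int) (n : Int) (m : Int) (d : Int) (nums : List Int) (out : Int) : Decidable (Spec_laundry l n m d nums out) := by unfold Spec_laundry; infer_instance

-- ===== CLAIM (what is proved, stated in full; the proofs are below) =====
def Claim_equal_laundry : Prop := ∀ (l : Int) (n : Int) (m : Int) (d : Int) (nums : List Int), Dom_laundry l n m d nums → Pre_laundry l n m d nums → Spec_laundry l n m d nums (laundry l n m d nums)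

-- ===== LEMMAS AND PROOFS =====

theorem pvLexLe_iff (a b : Int × Int) :
    pvLexLe a b = true ↔ (a.1 < b.1 ∨ (a.1 = b.1 ∧ a.2 ≤ b.2)) := by
  simp [pvLexLe]

theorem pvLexLe_total (a b : Int × Int) : pvLexLe a b = true ∨ pvLexLe b a = true := by
  simp only [pvLexLe_iff]; omega

theorem pvLexLe_trans {a b c : Int × Int} (h1 : pvLexLe a b = true) (h2 : pvLexLe b c = true) :
    pvLexLe a c = true := by
  simp only [pvLexLe_iff] at *; omega

theorem pvLexLe_antisymm {a b : Int × Int} (h1 : pvLexLe a b = true) (h2 : pvLexLe b a = true) :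
    a = b := by
  obtain ⟨a1, a2⟩ := a; obtain ⟨b1, b2⟩ := b
  simp only [pvLexLe_iff] at h1 h2
  simp only [Prod.mk.injEq]
  constructor <;> omega

theorem pvFoldMin_mem :
    ∀ (xs : List (Int × Int)) (x : Int × Int),
      xs.foldl (fun a b => if pvLexLe a b then a else b) x = x ∨
      xs.foldl (fun a b => if pvLexLe a b then a else b) x ∈ xs := by
  intro xs
  induction xs with
  | nil => intro x; left; rfl
  | cons h t ih =>
    intro x
    simp only [List.foldl_cons]
    rcases ih (if pvLexLe x h then x else h) with hc | hc
    · rw [hc]; by_cases hle : pvLexLe x h = true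
      · simp [hle]
      · simp [hle]
    · right; exact List.mem_cons_of_mem _ hc

theorem pvFoldMin_le :
    ∀ (xs : List (Int × Int)) (x y : Int × Int), (y = x ∨ y ∈ xs) →
      pvLexLe (xs.foldl (fun a b => if pvLexLe a b then a else b) x) y = true := by
  intro xs
  induction xs with
  | nil =>
    intro x y hy
    rcases hy with rfl | hy
    · simp only [List.foldl_nil]
      rcases pvLexLe_total y y with h | h <;> exact h
    · simp at hy
  | cons h t ih =>
    intro x y hy
    simp only [List.foldl_cons]
    have hminx : pvLexLe (if pvLexLe x h then x else h) x = true := by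
      by_cases hle : pvLexLe x h = true
      · simp only [hle, if_true]
        rcases pvLexLe_total x x with h' | h' <;> exact h'
      · simp only [hle]
        rcases pvLexLe_total x h with h' | h'
        · exact absurd h' hle
        · simpa using h'
    have hminh : pvLexLe (if pvLexLe x h then x else h) h = true := by
      by_cases hle : pvLexLe x h = true
      · simp [hle]
      · simp only [hle]
        rcases pvLexLe_total h h with h' | h' <;> simpa using h'
    rcases hy with rfl | hy
    · exact pvLexLe_trans (ih _ _ (Or.inl rfl)) hminx
    · rcases List.mem_cons.mp hy with rfl | hy
      · exact pvLexLe_trans (ih _ _ (Or.inl rfl)) hminh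
      · exact ih _ _ (Or.inr hy)

theorem pvQMin_mem {q : List (Int × Int)} (h : q ≠ []) : pvQMin q ∈ q := by
  cases q with
  | nil => exact absurd rfl h
  | cons x xs =>
    show xs.foldl (fun a b => if pvLexLe a b then a else b) x ∈ x :: xs
    rcases pvFoldMin_mem xs x with hc | hc
    · rw [hc]; exact List.mem_cons_self
    · exact List.mem_cons_of_mem _ hc

theorem pvQMin_le {q : List (Int × Int)} {y : Int × Int} (hy : y ∈ q) :
    pvLexLe (pvQMin q) y = true := by
  cases q with
  | nil => simp at hy
  | cons x xs =>
    show pvLexLe (xs.foldl (fun a b => if pvLexLe a b then a else b) x) y = true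
    rcases List.mem_cons.mp hy with hxy | hxy
    · exact pvFoldMin_le xs x y (Or.inl hxy)
    · exact pvFoldMin_le xs x y (Or.inr hxy)

theorem pvQMin_eq_of_least {q : List (Int × Int)} (h : q ≠ []) {p : Int × Int}
    (hp : p ∈ q) (hle : ∀ y ∈ q, pvLexLe p y = true) : pvQMin q = p :=
  pvLexLe_antisymm (pvQMin_le hp) (hle _ (pvQMin_mem h))

-- the pairs (next_free[k], k): the multiset A's queue always holds
def pvPairs (next : List Int) : List (Int × Int) :=
  (List.range next.length).map (fun k => (next.getD k 0, (k : Int)))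

theorem length_pvPairs (next : List Int) : (pvPairs next).length = next.length := by
  simp [pvPairs]

theorem getElem_pvPairs (next : List Int) (i : Nat) (h : i < (pvPairs next).length) :
    (pvPairs next)[i] = (next.getD i 0, (i : Int)) := by
  simp [pvPairs]

theorem mem_pvPairs {next : List Int} {p : Int × Int} :
    p ∈ pvPairs next ↔ ∃ k : Nat, k < next.length ∧ p = (next.getD k 0, (k : Int)) := by
  constructor
  · intro hp
    rcases List.mem_map.mp hp with ⟨k, hk, rfl⟩
    exact ⟨k, List.mem_range.mp hk, rfl⟩
  · rintro ⟨k, hk, rfl⟩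
    exact List.mem_map.mpr ⟨k, List.mem_range.mpr hk, rfl⟩

theorem pvArgmin_aux (next : List Int) :
    ∀ (c : Nat), ∃ bn : Nat,
      (List.range c).foldl
        (fun (bi : Int) (k : Nat) =>
          if PySem.List.pyGetD next (1 + (k : Int)) 0 < PySem.List.pyGetD next bi 0
          then 1 + (k : Int) else bi) 0 = (bn : Int) ∧
      bn < c + 1 ∧
      ∀ i, i < c + 1 →
        (next.getD bn 0 < next.getD i 0 ∨ (next.getD bn 0 = next.getD i 0 ∧ bn ≤ i)) := by
  intro c
  induction c with
  | zero =>
    refine ⟨0, by simp, by omega, ?_⟩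
    intro i hi
    interval_cases i
    right; exact ⟨rfl, le_rfl⟩
  | succ c ih =>
    obtain ⟨bn, hfold, hbn, hspec⟩ := ih
    rw [List.range_succ, List.foldl_append, hfold]
    simp only [List.foldl_cons, List.foldl_nil]
    have h1 : (1 : Int) + (c : Int) = ((c + 1 : Nat) : Int) := by push_cast; ring
    have hg1 : PySem.List.pyGetD next (1 + (c : Int)) 0 = next.getD (c + 1) 0 := by
      rw [h1, PySem.List.pyGetD_natCast]
    have hg2 : PySem.List.pyGetD next ((bn : Nat) : Int) 0 = next.getD bn 0 := by
      rw [PySem.List.pyGetD_natCast]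
    by_cases hlt : PySem.List.pyGetD next (1 + (c : Int)) 0 < PySem.List.pyGetD next ((bn : Nat) : Int) 0
    · refine ⟨c + 1, by rw [if_pos hlt, h1], by omega, ?_⟩
      rw [hg1, hg2] at hlt
      intro i hi
      by_cases hic : i = c + 1
      · subst hic; right; exact ⟨rfl, le_rfl⟩
      · have hi' : i < c + 1 := by omega
        rcases hspec i hi' with h' | h'
        · left; omega
        · left; omega
    · refine ⟨bn, by rw [if_neg hlt], by omega, ?_⟩
      rw [hg1, hg2] at hlt
      intro i hi
      by_cases hic : i = c + 1
      · subst hic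
        by_cases heq : next.getD bn 0 = next.getD (c + 1) 0
        · right; exact ⟨heq, by omega⟩
        · left; omega
      · exact hspec i (by omega)

theorem pvArgmin_spec {next : List Int} (h : next ≠ []) :
    ∃ bn : Nat, pvArgmin next = (bn : Int) ∧ bn < next.length ∧
      ∀ i, i < next.length →
        (next.getD bn 0 < next.getD i 0 ∨ (next.getD bn 0 = next.getD i 0 ∧ bn ≤ i)) := by
  have hlen : 0 < next.length := List.length_pos_iff.mpr h
  obtain ⟨bn, hfold, hbn, hspec⟩ := pvArgmin_aux next (next.length - 1)
  refine ⟨bn, ?_, by omega, fun i hi => hspec i (by omega)⟩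
  unfold pvArgmin
  rw [PySem.List.pyRange_one, List.foldl_map]
  have hc : ((next.length : Int) - 1).toNat = next.length - 1 := by omega
  rw [hc]
  exact hfold

-- ===== the wash loops: A's pop stream = B's argmin stream =====

-- A's pop stream, separated from the drying state (they do not interact)
def pvPops (nums : List Int) : Nat → List (Int × Int) → List Int
  | 0, _ => []
  | fuel + 1, w =>
      let p := pvQMin w
      p.1 :: pvPops nums fuel (w.erase p ++ [(p.1 + PySem.List.pyGetD nums p.2 0, p.2)])

-- A's drying fold over a fixed list of wash-finish times
def pvDry (d m : Int) : List Int → List Int → Int → List Int × Int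
  | [], dry, dryIndex => (dry, dryIndex)
  | t :: ts, dry, dryIndex =>
      pvDry d m ts (PySem.List.pySetD dry dryIndex (max (PySem.List.pyGetD dry dryIndex 0) t + d))
        (PySem.Int.mod (dryIndex + 1) m)

theorem pvAStep_decouple (nums : List Int) (d m : Int) :
    ∀ (fuel : Nat) (w : List (Int × Int)) (dry : List Int) (di : Int),
      pvAStep nums d m fuel w dry di = pvDry d m (pvPops nums fuel w) dry di := by
  intro fuel
  induction fuel with
  | zero => intro w dry di; rfl
  | succ fuel ih =>
    intro w dry di
    simp only [pvAStep, pvPops, pvDry]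
    exact ih _ _ _

-- B's value stream
def pvVals (nums : List Int) : Nat → List Int → List Int
  | 0, _ => []
  | fuel + 1, next =>
      let bi := pvArgmin next
      let t := PySem.List.pyGetD next bi 0
      t :: pvVals nums fuel (PySem.List.pySetD next bi (t + PySem.List.pyGetD nums bi 0))

theorem pvBWash_acc (nums : List Int) :
    ∀ (fuel : Nat) (next times : List Int),
      pvBWash nums fuel next times = times ++ pvVals nums fuel next := by
  intro fuel
  induction fuel with
  | zero => intro next times; simp [pvBWash, pvVals]
  | succ fuel ih =>
    intro next times
    simp only [pvBWash, pvVals]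
    rw [ih, List.append_assoc]
    rfl

theorem pvVals_length (nums : List Int) :
    ∀ (fuel : Nat) (next : List Int), (pvVals nums fuel next).length = fuel := by
  intro fuel
  induction fuel with
  | zero => intro next; rfl
  | succ fuel ih => intro next; simp only [pvVals, List.length_cons, ih]

theorem pvPairs_set (next : List Int) (bn : Nat) (v : Int) (h : bn < next.length) :
    pvPairs (next.set bn v) = (pvPairs next).set bn (v, (bn : Int)) := by
  apply List.ext_getElem
  · simp [pvPairs]
  · intro i h1 h2
    have hi : i < next.length := by simpa [pvPairs] using h1
    rw [List.getElem_set]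
    rw [getElem_pvPairs _ _ (by simpa [pvPairs] using h1)]
    rw [getElem_pvPairs _ _ (by simpa [length_pvPairs] using hi)]
    by_cases hib : bn = i
    · subst hib
      simp [List.getD_eq_getElem?_getD, List.getElem?_set_self h]
    · simp only [if_neg hib]
      have hne : (next.set bn v).getD i 0 = next.getD i 0 := by
        simp [List.getD_eq_getElem?_getD, List.getElem?_set_ne hib]
      rw [hne]

-- one simulation step preserves 'queue ~ pvPairs next'
theorem pvPerm_step {w : List (Int × Int)} {next : List Int} {bn : Nat} (hbn : bn < next.length)
    (hperm : w.Perm (pvPairs next)) (v' : Int) :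
    (w.erase (next.getD bn 0, (bn : Int)) ++ [(v', (bn : Int))]).Perm
      (pvPairs (next.set bn v')) := by
  set pb : Int × Int := (next.getD bn 0, (bn : Int)) with hpb
  have hlenp : (pvPairs next).length = next.length := length_pvPairs next
  have hdecomp : pvPairs next =
      (pvPairs next).take bn ++ pb :: (pvPairs next).drop (bn + 1) := by
    conv_lhs => rw [← List.take_append_drop bn (pvPairs next)]
    congr 1
    rw [List.drop_eq_getElem_cons (by rw [length_pvPairs]; omega)]
    congr 1
    rw [getElem_pvPairs _ _ (by rw [length_pvPairs]; omega)]
  have htake : (pvPairs next).take bn = (List.range bn).map (fun k => (next.getD k 0, (k : Int))) := by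
    unfold pvPairs
    rw [← List.map_take, List.take_range, Nat.min_eq_left (by omega)]
  have hnotmem : pb ∉ (pvPairs next).take bn := by
    rw [htake]
    intro hmem
    rcases List.mem_map.mp hmem with ⟨k, hk, hkeq⟩
    have hk' : k < bn := List.mem_range.mp hk
    have hsnd : (k : Int) = (bn : Int) := congrArg Prod.snd hkeq
    omega
  have herase : (pvPairs next).erase pb =
      (pvPairs next).take bn ++ (pvPairs next).drop (bn + 1) := by
    conv_lhs => rw [hdecomp]
    rw [List.erase_append_right _ hnotmem, List.erase_cons_head]
  have hlt : ((pvPairs next).take bn).length = bn := by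
    rw [List.length_take, length_pvPairs]; omega
  have hset : (pvPairs next).set bn (v', (bn : Int)) =
      (pvPairs next).take bn ++ (v', (bn : Int)) :: (pvPairs next).drop (bn + 1) := by
    conv_lhs => rw [hdecomp]
    rw [List.set_append_right _ _ (by omega)]
    rw [hlt]
    simp
  rw [pvPairs_set _ _ _ hbn, hset]
  have s1 : (w.erase pb ++ [(v', (bn : Int))]).Perm
      (((pvPairs next).erase pb) ++ [(v', (bn : Int))]) := (hperm.erase pb).append_right _
  rw [herase, List.append_assoc] at s1
  exact s1.trans (List.Perm.append_left _ (List.perm_append_singleton _ _))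

-- the head of A's queue is B's argmin pair
theorem pvQMin_eq_argmin {w : List (Int × Int)} {next : List Int} (hne : next ≠ [])
    (hperm : w.Perm (pvPairs next)) {bn : Nat}
    (hbnlt : bn < next.length)
    (hspec : ∀ i, i < next.length →
      (next.getD bn 0 < next.getD i 0 ∨ (next.getD bn 0 = next.getD i 0 ∧ bn ≤ i))) :
    pvQMin w = (next.getD bn 0, (bn : Int)) := by
  have hwne : w ≠ [] := by
    intro h; subst h
    have hl := hperm.length_eq
    simp [length_pvPairs] at hl
    exact hne (List.length_eq_zero_iff.mp hl.symm)
  apply pvQMin_eq_of_least hwne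
  · exact hperm.mem_iff.mpr (mem_pvPairs.mpr ⟨bn, hbnlt, rfl⟩)
  · intro y hy
    have hy' := hperm.mem_iff.mp hy
    rcases mem_pvPairs.mp hy' with ⟨k, hk, rfl⟩
    rw [pvLexLe_iff]
    rcases hspec k hk with h' | ⟨h1, h2⟩
    · left; exact h'
    · right
      refine ⟨h1, ?_⟩
      show ((bn : Nat) : Int) ≤ ((k : Nat) : Int)
      exact_mod_cast h2

theorem pvPops_eq_vals (nums : List Int) :
    ∀ (fuel : Nat) (next : List Int) (w : List (Int × Int)),
      next ≠ [] → w.Perm (pvPairs next) →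
      pvPops nums fuel w = pvVals nums fuel next := by
  intro fuel
  induction fuel with
  | zero => intros; rfl
  | succ fuel ih =>
    intro next w hne hperm
    obtain ⟨bn, hbn, hbnlt, hspec⟩ := pvArgmin_spec hne
    have hqmin := pvQMin_eq_argmin hne hperm hbnlt hspec
    simp only [pvPops, pvVals, hqmin, hbn]
    have hbget : PySem.List.pyGetD next ((bn : Nat) : Int) 0 = next.getD bn 0 := by
      rw [PySem.List.pyGetD_natCast]
    have hnget : PySem.List.pyGetD nums ((bn : Nat) : Int) 0 = nums.getD bn 0 := by
      rw [PySem.List.pyGetD_natCast]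
    rw [hbget, hnget, PySem.List.pySetD_natCast]
    congr 1
    apply ih
    · intro h
      apply hne
      have hl := congrArg List.length h
      simp only [List.length_set, List.length_nil] at hl
      exact List.length_eq_zero_iff.mp hl
    · exact pvPerm_step hbnlt hperm _

-- ===== the dry loops: A's array simulation = the per-slot recurrence pvG =====

-- value held by the drier slot r after the first j loads
def pvG (ts : List Int) (m d : Int) : Nat → Int → Int
  | 0, _ => 0
  | j + 1, r =>
      if PySem.Int.mod (j : Int) m = r
      then max (pvG ts m d j r) (PySem.List.pyGetD ts (j : Int) 0) + d
      else pvG ts m d j r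

theorem pvMod_bounds {m : Int} (hm : 0 < m) (a : Int) :
    0 ≤ PySem.Int.mod a m ∧ PySem.Int.mod a m < m := by
  rw [PySem.Int.mod_eq_emod_of_pos hm]
  exact ⟨Int.emod_nonneg a (by omega), Int.emod_lt_of_pos a hm⟩

theorem pvMod_succ {m : Int} (hm : 0 < m) (a : Int) :
    PySem.Int.mod (PySem.Int.mod a m + 1) m = PySem.Int.mod (a + 1) m := by
  rw [PySem.Int.mod_eq_emod_of_pos hm, PySem.Int.mod_eq_emod_of_pos hm,
    PySem.Int.mod_eq_emod_of_pos hm]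
  conv_rhs => rw [Int.add_emod]
  rw [Int.add_emod (a % m) 1 m, Int.emod_emod_of_dvd _ (dvd_refl m)]

theorem pvMod_idx {m : Int} (hm : 0 < m) (a : Int) :
    PySem.Int.mod (PySem.Int.mod a m + m - 1) m = PySem.Int.mod (a - 1) m := by
  rw [PySem.Int.mod_eq_emod_of_pos hm, PySem.Int.mod_eq_emod_of_pos hm,
    PySem.Int.mod_eq_emod_of_pos hm]
  have h1 : a % m + m - 1 = (a % m - 1) + m := by ring
  rw [h1, Int.add_emod_right]
  conv_rhs => rw [Int.sub_emod]
  rw [Int.sub_emod (a % m) 1 m, Int.emod_emod_of_dvd _ (dvd_refl m)]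

theorem pvDry_run {m d : Int} (hm : 0 < m) (ts : List Int) :
    ∀ (us : List Int) (j : Nat) (dry : List Int),
      us = ts.drop j → dry.length = m.toNat →
      (∀ r : Int, 0 ≤ r → r < m → PySem.List.pyGetD dry r 0 = pvG ts m d j r) →
      (∀ r : Int, 0 ≤ r → r < m →
        PySem.List.pyGetD (pvDry d m us dry (PySem.Int.mod (j : Int) m)).1 r 0 =
          pvG ts m d (j + us.length) r) ∧
      (pvDry d m us dry (PySem.Int.mod (j : Int) m)).2 =
        PySem.Int.mod ((j : Int) + us.length) m := by
  intro us
  induction us with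
  | nil =>
    intro j dry _ _ hinv
    simp only [pvDry, List.length_nil]
    exact ⟨fun r h0 hr => by simpa using hinv r h0 hr, by simp⟩
  | cons t us ih =>
    intro j dry hdrop hlen hinv
    have hjlt : j < ts.length := by
      by_contra hge
      rw [List.drop_eq_nil_of_le (by omega)] at hdrop
      exact List.cons_ne_nil t us hdrop
    have hd2 := hdrop
    rw [List.drop_eq_getElem_cons hjlt] at hd2
    have ht : t = ts[j] := (List.cons_eq_cons.mp hd2).1
    have hus : us = ts.drop (j + 1) := (List.cons_eq_cons.mp hd2).2
    obtain ⟨hdi0, hdim⟩ := pvMod_bounds hm (j : Int)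
    set di := PySem.Int.mod (j : Int) m with hdi
    set nn := di.toNat with hnn
    have hdin : di = ((nn : Nat) : Int) := by omega
    have hnlt : nn < dry.length := by omega
    set v := max (PySem.List.pyGetD dry di 0) t + d with hv
    have hinv' : ∀ r : Int, 0 ≤ r → r < m →
        PySem.List.pyGetD (PySem.List.pySetD dry di v) r 0 = pvG ts m d (j + 1) r := by
      intro r h0 hr
      have hrn : r = ((r.toNat : Nat) : Int) := by omega
      rw [hdin, hrn, PySem.List.pyGetD_pySetD_natCast dry nn r.toNat _ _ (by omega), ← hrn]
      by_cases hcase : r.toNat = nn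
      · rw [if_pos hcase]
        have hcond : PySem.Int.mod ((j : Nat) : Int) m = r := by rw [← hdi]; omega
        have hreq : di = r := by omega
        simp only [pvG, if_pos hcond]
        rw [hv, hreq, hinv r h0 hr]
        have hts : PySem.List.pyGetD ts ((j : Nat) : Int) 0 = ts.getD j 0 :=
          PySem.List.pyGetD_natCast ..
        rw [hts, List.getD_eq_getElem _ _ hjlt, ← ht]
      · rw [if_neg hcase]
        have hrne : ¬ (PySem.Int.mod ((j : Nat) : Int) m = r) := by rw [← hdi]; omega
        simp only [pvG, if_neg hrne]
        exact hinv r h0 hr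
    have hlen' : (PySem.List.pySetD dry di v).length = m.toNat := by
      rw [PySem.List.length_pySetD]; exact hlen
    have hstep := ih (j + 1) (PySem.List.pySetD dry di v) (by exact_mod_cast hus) hlen'
      (by intro r h0 hr; exact hinv' r h0 hr)
    have hcast : PySem.Int.mod (di + 1) m = PySem.Int.mod (((j + 1 : Nat) : Nat) : Int) m := by
      have hc : ((j : Nat) : Int) + 1 = (((j + 1 : Nat) : Nat) : Int) := by push_cast; ring
      rw [hdi, pvMod_succ hm, hc]
    constructor
    · intro r h0 hr
      show PySem.List.pyGetD (pvDry d m us (PySem.List.pySetD dry di v)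
        (PySem.Int.mod (di + 1) m)).1 r 0 = _
      rw [hcast]
      rw [(hstep.1 r h0 hr : _)]
      congr 1
      simp only [List.length_cons]
      omega
    · show (pvDry d m us (PySem.List.pySetD dry di v) (PySem.Int.mod (di + 1) m)).2 = _
      rw [hcast, hstep.2]
      congr 1
      simp only [List.length_cons]
      push_cast; ring

-- ===== the chain fold over pyRange with step m = pvG =====

theorem pvRange_step_nil {s : Int} (hs : 0 < s) {a b : Int} (h : b ≤ a) :
    PySem.List.pyRange a b s = [] := by
  rw [PySem.List.pyRange_of_pos _ _ hs, if_neg (by omega)]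
  simp

theorem pvRange_step_snoc {s : Int} (hs : 0 < s) {a j : Int} (ha : a ≤ j) (hdvd : s ∣ j - a) :
    PySem.List.pyRange a (j + 1) s = PySem.List.pyRange a j s ++ [j] := by
  obtain ⟨q, hq⟩ := hdvd
  have hq0 : 0 ≤ q := by
    by_contra hneg
    have hneg' : s * q < 0 := mul_neg_of_pos_of_neg hs (by omega)
    omega
  have hsq0 : 0 ≤ s * q := mul_nonneg hs.le hq0
  have hdiv1 : (j + 1 - a + s - 1) / s = q + 1 := by
    have hc : j + 1 - a + s - 1 = s * (q + 1) := by linear_combination hq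
    rw [hc, Int.mul_ediv_cancel_left _ (by omega)]
  rw [PySem.List.pyRange_of_pos _ _ hs, PySem.List.pyRange_of_pos _ _ hs,
    if_pos (by omega : a < j + 1), hdiv1,
    (by omega : (q + 1).toNat = q.toNat + 1), List.range_succ, List.map_append]
  by_cases haj : a < j
  · have hdiv2 : (j - a + s - 1) / s = q := by
      have hc : j - a + s - 1 = (s - 1) + s * q := by linear_combination hq
      rw [hc, Int.add_mul_ediv_left _ _ (by omega : s ≠ 0),
        Int.ediv_eq_zero_of_lt (by omega) (by omega)]
      ring
    rw [if_pos haj, hdiv2]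
    congr 1
    simp only [List.map_cons, List.map_nil]
    congr 1
    rw [Int.toNat_of_nonneg hq0]
    linear_combination -hq
  · have haj' : a = j := by omega
    have hq' : q = 0 := by
      have hz : s * q = 0 := by omega
      rcases mul_eq_zero.mp hz with h' | h'
      · omega
      · exact h'
    rw [if_neg haj, hq']
    simp [haj']

theorem pvRange_step_same {s : Int} (hs : 0 < s) {a j : Int} (hdvd : ¬ s ∣ j - a) :
    PySem.List.pyRange a (j + 1) s = PySem.List.pyRange a j s := by
  by_cases haj : a ≤ j
  · have haj' : a < j := by
      rcases lt_or_eq_of_le haj with h' | h'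
      · exact h'
      · exact absurd (h' ▸ ⟨0, by ring⟩ : s ∣ j - a) hdvd
    set q := (j - a) / s with hqdef
    set r := (j - a) % s with hrdef
    have hqr : s * q + r = j - a := Int.ediv_add_emod (j - a) s
    have hr0 : 0 ≤ r := Int.emod_nonneg _ (by omega)
    have hrs : r < s := Int.emod_lt_of_pos _ hs
    have hrne : r ≠ 0 := by
      intro h'
      exact hdvd (Int.dvd_of_emod_eq_zero (by rw [← hrdef]; exact h'))
    have hdiv1 : (j + 1 - a + s - 1) / s = q + 1 := by
      have h1 : j + 1 - a + s - 1 = (r + s) + s * q := by linear_combination -hqr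
      have h2 : (r + s) / s = 1 := by
        have h3 : r + s = r + s * 1 := by ring
        rw [h3, Int.add_mul_ediv_left _ _ (by omega : s ≠ 0),
          Int.ediv_eq_zero_of_lt hr0 hrs]
        norm_num
      rw [h1, Int.add_mul_ediv_left _ _ (by omega : s ≠ 0), h2]
      ring
    have hdiv2 : (j - a + s - 1) / s = q + 1 := by
      have h1 : j - a + s - 1 = ((r - 1) + s) + s * q := by linear_combination -hqr
      have h2 : ((r - 1) + s) / s = 1 := by
        have h3 : (r - 1) + s = (r - 1) + s * 1 := by ring
        rw [h3, Int.add_mul_ediv_left _ _ (by omega : s ≠ 0),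
          Int.ediv_eq_zero_of_lt (by omega) (by omega)]
        norm_num
      rw [h1, Int.add_mul_ediv_left _ _ (by omega : s ≠ 0), h2]
      ring
    rw [PySem.List.pyRange_of_pos _ _ hs, PySem.List.pyRange_of_pos _ _ hs,
      if_pos (by omega), if_pos haj', hdiv1, hdiv2]
  · rw [pvRange_step_nil hs (by omega), pvRange_step_nil hs (by omega)]

theorem pvMod_eq_iff_dvd {m : Int} (hm : 0 < m) {a : Int} (h0 : 0 ≤ a) (ha : a < m) (j : Nat) :
    PySem.Int.mod (j : Int) m = a ↔ m ∣ ((j : Int) - a) := by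
  rw [PySem.Int.mod_eq_emod_of_pos hm]
  constructor
  · intro h
    have : ((j : Int) - a) % m = 0 := by
      rw [Int.sub_emod, h, Int.emod_eq_of_lt h0 ha]
      simp
    exact Int.dvd_of_emod_eq_zero this
  · intro hdvd
    obtain ⟨k, hk⟩ := hdvd
    have hk0 : 0 ≤ k := by
      by_contra hneg
      have hkle : k ≤ -1 := by omega
      have : m * k ≤ m * (-1) := by
        exact mul_le_mul_of_nonneg_left hkle (by omega)
      omega
    have : (j : Int) = a + m * k := by omega
    rw [this, Int.add_mul_emod_self_left, Int.emod_eq_of_lt h0 ha]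

theorem pvChain_fold {m d : Int} (hm : 0 < m) (ts : List Int) {a : Int} (h0 : 0 ≤ a) (ha : a < m) :
    ∀ j : Nat,
      (PySem.List.pyRange a (j : Int) m).foldl
        (fun best i => max best (PySem.List.pyGetD ts i 0) + d) 0 = pvG ts m d j a := by
  intro j
  induction j with
  | zero =>
    rw [pvRange_step_nil hm (by exact_mod_cast h0)]
    rfl
  | succ j ih =>
    have hcast : ((j + 1 : Nat) : Int) = (j : Int) + 1 := by push_cast; ring
    rw [hcast]
    by_cases hcond : PySem.Int.mod (j : Int) m = a
    · have hdvd := (pvMod_eq_iff_dvd hm h0 ha j).mp hcond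
      have haj : a ≤ (j : Int) := by
        by_contra hlt
        obtain ⟨k, hk⟩ := hdvd
        have hk1 : m * k < m * 0 := by omega
        have hk2 : m * (-1) < m * k := by omega
        have hk1' : k < 0 := lt_of_mul_lt_mul_left hk1 (by omega)
        have hk2' : (-1 : Int) < k := lt_of_mul_lt_mul_left hk2 (by omega)
        omega
      rw [pvRange_step_snoc hm haj hdvd, List.foldl_append, ih]
      simp only [List.foldl_cons, List.foldl_nil, pvG, if_pos hcond]
    · have hdvd : ¬ m ∣ ((j : Int) - a) := fun h => hcond ((pvMod_eq_iff_dvd hm h0 ha j).mpr h)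
      rw [pvRange_step_same hm hdvd, ih]
      simp only [pvG, if_neg hcond]

-- ===== assembling the main theorem =====

theorem pvW0_eq_pairs (nums : List Int) :
    (PySem.List.pyRange 0 (nums.length : Int) 1).map
      (fun i => (PySem.List.pyGetD nums i 0, i)) = pvPairs nums := by
  rw [PySem.List.pyRange_one]
  unfold pvPairs
  rw [List.map_map]
  have hc : ((nums.length : Int) - 0).toNat = nums.length := by omega
  rw [hc]
  apply List.map_congr_left
  intro k _
  simp [PySem.List.pyGetD_natCast]

theorem pvReplicate_inv {m : Int} (hm : 0 < m) (ts : List Int) (d : Int) :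
    ∀ r : Int, 0 ≤ r → r < m →
      PySem.List.pyGetD (List.replicate m.toNat (0 : Int)) r 0 = pvG ts m d 0 r := by
  intro r h0 hr
  have hrn : r = ((r.toNat : Nat) : Int) := by omega
  rw [hrn, PySem.List.pyGetD_natCast]
  rw [List.getD_eq_getElem _ _ (by simp; omega)]
  simp [pvG]

-- ===== VERDICT (by name: the statement is the Claim_ definition above) =====
theorem laundry_spec : Claim_equal_laundry := by
  intro l n m d nums _ hpre
  obtain ⟨hm1, hlnums⟩ := hpre
  have hm : 0 < m := by omega
  show laundry l n m d nums = laundry_alt l n m d nums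
  simp only [laundry, laundry_alt]
  by_cases hl : l ≤ 0
  · have hl0 : l.toNat = 0 := by omega
    rw [if_pos hl, hl0]
    show PySem.List.pyGetD (List.replicate m.toNat (0 : Int)) (PySem.Int.mod (0 + m - 1) m) 0 = 0
    obtain ⟨h0, hlt⟩ := pvMod_bounds hm (0 + m - 1)
    set r := PySem.Int.mod (0 + m - 1) m with hr
    have hrn : r = ((r.toNat : Nat) : Int) := by omega
    rw [hrn, PySem.List.pyGetD_natCast, List.getD_eq_getElem _ _ (by simp; omega)]
    simp
  · rw [if_neg hl]
    have hlpos : 0 < l := by omega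
    have hne : nums ≠ [] := hlnums hlpos
    set L := l.toNat with hLdef
    have hL : (L : Int) = l := Int.toNat_of_nonneg (by omega)
    set ts := pvVals nums L nums with hts
    have htslen : ts.length = L := pvVals_length nums L nums
    -- B's times list
    have htimes : pvBWash nums L nums [] = ts := by
      rw [pvBWash_acc]; simp [hts]
    -- A's pop stream
    have hpops : pvPops nums L ((PySem.List.pyRange 0 (nums.length : Int) 1).map
        (fun i => (PySem.List.pyGetD nums i 0, i))) = ts := by
      rw [pvW0_eq_pairs, hts]
      exact pvPops_eq_vals nums L nums (pvPairs nums) hne (List.Perm.refl _)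
    -- run A's drying
    have hzero : (0 : Int) = PySem.Int.mod ((0 : Nat) : Int) m := by
      rw [PySem.Int.mod_eq_emod_of_pos hm]
      simp
    have hdry := pvDry_run hm ts ts 0 (List.replicate m.toNat 0) (by simp)
      (by simp) (pvReplicate_inv hm ts d)
    rw [pvAStep_decouple, hpops]
    obtain ⟨hdry1, hdry2⟩ := hdry
    rw [← hzero] at hdry1 hdry2
    rw [hdry2]
    have hidx : PySem.Int.mod (PySem.Int.mod (((0 : Nat) : Int) + ts.length) m + m - 1) m
        = PySem.Int.mod (l - 1) m := by
      rw [pvMod_idx hm]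
      congr 1
      rw [htslen, hL]
      push_cast
      ring
    rw [hidx]
    obtain ⟨ha0, ham⟩ := pvMod_bounds hm (l - 1)
    rw [hdry1 _ ha0 ham]
    rw [htimes]
    have hchain := @pvChain_fold m d hm ts (PySem.Int.mod (l - 1) m) ha0 ham L
    rw [hL] at hchain
    have hnn : 0 + ts.length = L := by omega
    rw [hnn]
    exact hchain.symm
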